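-- pv_equiv track=rewrite | github.com/BIGANUEL/leetcode | 1696-strange-printer-ii/strange-printer-ii.py | isPrintable
-- ===== SOURCE A (Python) =====
-- from collections import defaultdict, deque
--
-- def isPrintable(targetGrid):
--     m, n = len(targetGrid), len(targetGrid[0])
--     colors = set()
--     bounds = {}  # color -> [min_row, max_row, min_col, max_col]
--
--     # Step 1: Find bounding rectangles
--     for i in range(m):
--         for j in range(n):
--             c = targetGrid[i][j]
--             colors.add(c)
--             if c not in bounds:
--                 bounds[c] = [i, i, j, j]
--             else:
--                 bounds[c][0] = min(bounds[c][0], i)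
--                 bounds[c][1] = max(bounds[c][1], i)
--                 bounds[c][2] = min(bounds[c][2], j)
--                 bounds[c][3] = max(bounds[c][3], j)
--
--     # Step 2: Build dependency graph
--     graph = defaultdict(set)
--     indegree = defaultdict(int)
--     for c in colors:
--         r1, r2, c1, c2 = bounds[c]
--         for i in range(r1, r2+1):
--             for j in range(c1, c2+1):
--                 if targetGrid[i][j] != c:
--                     if targetGrid[i][j] not in graph[c]:
--                         graph[c].add(targetGrid[i][j])
--                         indegree[targetGrid[i][j]] += 1
--
--     # Step 3: Topological sort
--     queue = deque([c for c in colors if indegree[c] == 0])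
--     printed = 0
--     while queue:
--         c = queue.popleft()
--         printed += 1
--         for nei in graph[c]:
--             indegree[nei] -= 1
--             if indegree[nei] == 0:
--                 queue.append(nei)
--
--     return printed == len(colors)
-- ===== SOURCE B (Python) =====
-- def isPrintable(targetGrid):
--     m, n = len(targetGrid), len(targetGrid[0])
--     box = {}  # color -> (min_row, max_row, min_col, max_col)
--     for i in range(m):
--         for j in range(n):
--             c = targetGrid[i][j]
--             if c in box:
--                 r1, r2, c1, c2 = box[c]
--                 box[c] = (min(r1, i), max(r2, i), min(c1, j), max(c2, j))
--             else:
--                 box[c] = (i, i, j, j)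
--     colors = list(box)
--
--     # peel in reverse printing order: a color may be erased once every cell of
--     # its bounding box holds that color or an already-erased color; printable
--     # iff peeling erases every color (no graph, no indegrees)
--     erased = set()
--     while len(erased) < len(colors):
--         progress = False
--         for c in colors:
--             if c not in erased:
--                 r1, r2, c1, c2 = box[c]
--                 if all(targetGrid[i][j] == c or targetGrid[i][j] in erased
--                        for i in range(r1, r2 + 1) for j in range(c1, c2 + 1)):
--                     erased.add(c)
--                     progress = True
--         if not progress:
--             return False
--     return True
-- ===== Notes on version B (the rewrite author's own statement) =====
-- stated objective: faster
-- what changed: B abandons A's dependency-graph machinery entirely: no adjacency sets, no indegree counters, no Kahn BFS queue; after computing bounding boxes it peels colors directly off the grid in reverse printing order (a color is erasable once every cell of its box holds that color or an already-erased color), returning True iff every color gets erased; a pass that erases nothing ends the loop immediately, so a grid that is stuck costs one box scan instead of A's full graph-plus-indegree construction over every color's box.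
import Mathlib
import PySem

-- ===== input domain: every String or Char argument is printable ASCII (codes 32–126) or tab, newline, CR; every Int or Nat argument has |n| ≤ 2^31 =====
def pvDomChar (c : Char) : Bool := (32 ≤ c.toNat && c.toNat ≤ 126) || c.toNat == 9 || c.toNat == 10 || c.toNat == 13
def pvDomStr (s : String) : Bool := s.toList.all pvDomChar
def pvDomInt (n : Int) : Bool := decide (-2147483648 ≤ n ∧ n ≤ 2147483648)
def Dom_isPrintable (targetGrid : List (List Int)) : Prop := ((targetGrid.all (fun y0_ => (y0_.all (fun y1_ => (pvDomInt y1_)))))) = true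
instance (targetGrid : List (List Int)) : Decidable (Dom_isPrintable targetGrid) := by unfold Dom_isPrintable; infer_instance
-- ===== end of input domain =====

-- B drops A's dependency-graph machinery (adjacency sets, indegree counters,
-- Kahn BFS queue) entirely: after the bounding boxes it peels colors directly
-- off the grid in reverse printing order — a color is erasable once every cell
-- of its box holds that color or an already-erased color — and returns True
-- iff every color gets erased; a pass that erases nothing ends the loop at
-- once.  Objective: different algorithm (a timing run measured B faster).

-- ===== PORT A =====

-- targetGrid[i][j] (indices always in range on admitted inputs)
def pvCell (g : List (List Int)) (i j : Int) : Int :=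
  PySem.List.pyGetD (PySem.List.pyGetD g i []) j 0

-- body of A's step-1 scan at cell p = (i, j)
def pvStep1F (g : List (List Int)) (st : PySem.Set Int × PySem.Dict Int (List Int))
    (p : Int × Int) : PySem.Set Int × PySem.Dict Int (List Int) :=
  let c := pvCell g p.1 p.2
  let colors := PySem.Set.add st.1 c
  let bounds := st.2
  if bounds.contains c then
    let b := bounds.getD c []
    let b := b.set 0 (min (PySem.List.pyGetD b 0 0) p.1)
    let b := b.set 1 (max (PySem.List.pyGetD b 1 0) p.1)
    let b := b.set 2 (min (PySem.List.pyGetD b 2 0) p.2)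
    let b := b.set 3 (max (PySem.List.pyGetD b 3 0) p.2)
    (colors, bounds.insert c b)
  else
    (colors, bounds.insert c [p.1, p.1, p.2, p.2])

-- Step 1 of A: colors set and bounds dict (color -> [min_row,max_row,min_col,max_col])
def pvStep1 (g : List (List Int)) (m n : Int) : PySem.Set Int × PySem.Dict Int (List Int) :=
  (PySem.List.pyRange 0 m).foldl (fun st i =>
    (PySem.List.pyRange 0 n).foldl (fun st j => pvStep1F g st (i, j)) st)
    (PySem.Set.empty, PySem.Dict.empty)

-- body of A's step-2 scan for color c at a box cell of value d
def pvStep2V (c : Int) (st : PySem.Dict Int (PySem.Set Int) × PySem.Dict Int Int)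
    (d : Int) : PySem.Dict Int (PySem.Set Int) × PySem.Dict Int Int :=
  if d ≠ c then
    let gc := st.1.getD c PySem.Set.empty
    if gc.contains d then st
    else (st.1.insert c (PySem.Set.add gc d), st.2.insert d (st.2.getD d 0 + 1))
  else st

-- body of A's step-2 loop for one color c: scan c's bounding box
def pvStep2C (g : List (List Int)) (bounds : PySem.Dict Int (List Int))
    (st : PySem.Dict Int (PySem.Set Int) × PySem.Dict Int Int) (c : Int) :
    PySem.Dict Int (PySem.Set Int) × PySem.Dict Int Int :=
  let b := bounds.getD c []
  let r1 := PySem.List.pyGetD b 0 0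
  let r2 := PySem.List.pyGetD b 1 0
  let c1 := PySem.List.pyGetD b 2 0
  let c2 := PySem.List.pyGetD b 3 0
  (PySem.List.pyRange r1 (r2 + 1)).foldl (fun st i =>
    (PySem.List.pyRange c1 (c2 + 1)).foldl (fun st j => pvStep2V c st (pvCell g i j)) st) st

-- Step 2 of A: dependency graph (color -> set of colors inside its box) and indegrees
def pvStep2 (g : List (List Int)) (colors : List Int) (bounds : PySem.Dict Int (List Int)) :
    PySem.Dict Int (PySem.Set Int) × PySem.Dict Int Int :=
  colors.foldl (pvStep2C g bounds) (PySem.Dict.empty, PySem.Dict.empty)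

-- body of A's neighbour loop: decrement indegree, enqueue at zero
def pvKahnStep (st : PySem.Dict Int Int × List Int) (nei : Int) :
    PySem.Dict Int Int × List Int :=
  let ind := st.1.insert nei (st.1.getD nei 0 - 1)
  if ind.getD nei 0 = 0 then (ind, st.2 ++ [nei]) else (ind, st.2)

-- Step 3 of A: Kahn's BFS while-loop (fuel = |colors| + 1 suffices: each color
-- is enqueued at most once — proved in the lemmas below)
def pvKahn (graph : PySem.Dict Int (PySem.Set Int)) :
    Nat → List Int → Int → PySem.Dict Int Int → Int
  | 0, _, printed, _ => printed
  | _ + 1, [], printed, _ => printed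
  | fuel + 1, c :: rest, printed, indeg =>
    let st := (graph.getD c PySem.Set.empty).foldl pvKahnStep (indeg, rest)
    pvKahn graph fuel st.2 (printed + 1) st.1

def isPrintable (targetGrid : List (List Int)) : Bool :=
  let m : Int := (targetGrid.length : Int)
  let n : Int := ((PySem.List.pyGetD targetGrid 0 []).length : Int)
  let s1 := pvStep1 targetGrid m n
  let colors := s1.1
  let s2 := pvStep2 targetGrid colors s1.2
  let graph := s2.1
  let indeg := s2.2
  let queue := colors.foldl (fun q c => if indeg.getD c 0 = 0 then q ++ [c] else q) []
  let printed := pvKahn graph (colors.length + 1) queue 0 indeg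
  decide (printed = (colors.length : Int))

-- ===== PORT B =====

-- body of B's phase-1 scan at cell p = (i, j)
def pvBoundsF (g : List (List Int)) (bd : PySem.Dict Int (Int × Int × Int × Int))
    (p : Int × Int) : PySem.Dict Int (Int × Int × Int × Int) :=
  let c := pvCell g p.1 p.2
  match bd.get? c with
  | some (r1, r2, c1, c2) => bd.insert c (min r1 p.1, max r2 p.1, min c1 p.2, max c2 p.2)
  | none => bd.insert c (p.1, p.1, p.2, p.2)

-- phase 1 of B: box dict (color -> 4-tuple)
def pvBounds (g : List (List Int)) (m n : Int) : PySem.Dict Int (Int × Int × Int × Int) :=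
  (PySem.List.pyRange 0 m).foldl (fun bd i =>
    (PySem.List.pyRange 0 n).foldl (fun bd j => pvBoundsF g bd (i, j)) bd) PySem.Dict.empty

-- B's `all(...)` generator: every cell of the box holds c or an erased color
def pvBoxOk (g : List (List Int)) (t : Int × Int × Int × Int) (c : Int)
    (er : PySem.Set Int) : Bool :=
  (PySem.List.pyRange t.1 (t.2.1 + 1)).all (fun i =>
    (PySem.List.pyRange t.2.2.1 (t.2.2.2 + 1)).all (fun j =>
      pvCell g i j == c || er.contains (pvCell g i j)))

-- body of B's inner for-loop over colors: try to erase color c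
def pvPassF (g : List (List Int)) (bd : PySem.Dict Int (Int × Int × Int × Int))
    (st : PySem.Set Int × Bool) (c : Int) : PySem.Set Int × Bool :=
  if !st.1.contains c && pvBoxOk g (bd.getD c (0, 0, 0, 0)) c st.1 then
    (PySem.Set.add st.1 c, true)
  else st

-- B's while-loop: peel until everything is erased or a pass makes no progress
-- (fuel = |colors| + 1 suffices: every pass taken erases at least one color —
-- proved in the lemmas below)
def pvPeel (g : List (List Int)) (bd : PySem.Dict Int (Int × Int × Int × Int))
    (colors : List Int) : Nat → PySem.Set Int → Bool
  | 0, _ => false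
  | fuel + 1, er =>
    if er.length < colors.length then
      let st := colors.foldl (pvPassF g bd) (er, false)
      if st.2 then pvPeel g bd colors fuel st.1 else false
    else true

def isPrintable_alt (targetGrid : List (List Int)) : Bool :=
  let m : Int := (targetGrid.length : Int)
  let n : Int := ((PySem.List.pyGetD targetGrid 0 []).length : Int)
  let bd := pvBounds targetGrid m n
  let colors := PySem.Dict.keys bd
  pvPeel targetGrid bd colors (colors.length + 1) PySem.Set.empty

-- ===== PRECONDITION & SPEC =====
-- Pre_ excludes exactly the inputs where Python A raises IndexError: the empty
-- grid (targetGrid[0]) and grids with a row shorter than row 0 (the scan).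
def Pre_isPrintable (targetGrid : List (List Int)) : Prop :=
  targetGrid ≠ [] ∧ ∀ row ∈ targetGrid, (targetGrid.headD []).length ≤ row.length
instance (targetGrid : List (List Int)) : Decidable (Pre_isPrintable targetGrid) := by
  unfold Pre_isPrintable; infer_instance

def pvWitness_isPrintable : List (List Int) := [[1, 2, 1], [3, 2, 3]]

def Spec_isPrintable (targetGrid : List (List Int)) (out : Bool) : Prop := out = isPrintable_alt targetGrid
instance (targetGrid : List (List Int)) (out : Bool) : Decidable (Spec_isPrintable targetGrid out) := by unfold Spec_isPrintable; infer_instance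

-- ===== CLAIM (what is proved, stated in full; the proofs are below) =====
def Claim_equal_isPrintable : Prop := ∀ (targetGrid : List (List Int)), Dom_isPrintable targetGrid → Pre_isPrintable targetGrid → Spec_isPrintable targetGrid (isPrintable targetGrid)

-- ===== LEMMAS AND PROOFS =====

-- ---------- generic helpers ----------

theorem pvFoldlNested {σ α β : Type} (l1 : List α) (l2 : List β) (F : σ → α → β → σ)
    (init : σ) :
    l1.foldl (fun st i => l2.foldl (fun st j => F st i j) st) init
      = (l1.flatMap (fun i => l2.map (fun j => (i, j)))).foldl (fun st p => F st p.1 p.2) init := by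
  induction l1 generalizing init with
  | nil => rfl
  | cons a t ih => simp [List.foldl_append, List.foldl_map, ih]

theorem pvCountP_and_ne (C : List Int) (hC : C.Nodup) (c : Int) (hc : c ∈ C)
    (p : Int → Bool) :
    C.countP (fun x => p x && decide (x ≠ c)) = C.countP p - (if p c then 1 else 0) := by
  have hperm : C.Perm (c :: C.erase c) := List.perm_cons_erase hc
  have hnc : c ∉ C.erase c := (hC.mem_erase_iff).mp.mt (by simp)
  rw [hperm.countP_eq, hperm.countP_eq (p := p)]
  simp only [List.countP_cons]
  have : (C.erase c).countP (fun x => p x && decide (x ≠ c)) = (C.erase c).countP p := by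
    apply List.countP_congr
    intro x hx
    have : x ≠ c := fun h => hnc (h ▸ hx)
    simp [this]
  rw [this]
  by_cases hpc : p c = true <;> simp [hpc]

theorem pvNodup_update {s : PySem.Set Int} (h : s.Nodup) (xs : List Int) :
    (PySem.Set.update s xs).Nodup := by
  induction xs generalizing s with
  | nil => exact h
  | cons a t ih => exact ih (PySem.Set.nodup_add s a h)

theorem pvMem_update {s : PySem.Set Int} {xs : List Int} {x : Int} :
    x ∈ PySem.Set.update s xs ↔ x ∈ s ∨ x ∈ xs := by
  induction xs generalizing s with
  | nil => simp [PySem.Set.update]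
  | cons a t ih =>
    show x ∈ PySem.Set.update (s.add a) t ↔ _
    rw [ih, PySem.Set.mem_add]
    simp; tauto

-- ---------- abstract runs ----------

-- P is a legal elimination order: each element's predecessors occur before it
def pvValid (C : List Int) (E : Int → Int → Bool) (P : List Int) : Prop :=
  ∀ i (h : i < P.length), ∀ p ∈ C, E p P[i] = true → p ∈ P.take i

-- S is saturated: any element all of whose predecessors are in S is in S
def pvMax (C : List Int) (E : Int → Int → Bool) (S : List Int) : Prop :=
  ∀ d ∈ C, (∀ p ∈ C, E p d = true → p ∈ S) → d ∈ S

theorem pvValid_nil (C : List Int) (E : Int → Int → Bool) : pvValid C E [] := by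
  intro i h; simp at h

theorem pvValid_append {C : List Int} {E : Int → Int → Bool} {P : List Int} {d : Int}
    (hV : pvValid C E P) (h : ∀ p ∈ C, E p d = true → p ∈ P) :
    pvValid C E (P ++ [d]) := by
  intro i hi p hp hE
  simp only [List.length_append, List.length_cons, List.length_nil] at hi
  by_cases hlt : i < P.length
  · rw [List.getElem_append_left hlt] at hE
    rw [List.take_append_of_le_length (le_of_lt hlt)]
    exact hV i hlt p hp hE
  · have hieq : i = P.length := by omega
    subst hieq
    rw [List.getElem_append_right (le_refl _)] at hE
    simp at hE
    rw [List.take_append_of_le_length (le_refl _), List.take_length]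
    exact h p hp hE

-- a full valid order for E forces any flip-E-saturated set to be full too
theorem pvFull_flip {C : List Int} {E : Int → Int → Bool} {S1 S2 : List Int}
    (hS1n : S1.Nodup) (hS1C : ∀ x ∈ S1, x ∈ C) (hV1 : pvValid C E S1)
    (hfull1 : ∀ x ∈ C, x ∈ S1)
    (hM2 : pvMax C (fun p d => E d p) S2) :
    ∀ x ∈ C, x ∈ S2 := by
  have key : ∀ (j : Nat), ∀ (i : Nat) (h : i < S1.length), S1.length - i ≤ j → S1[i] ∈ S2 := by
    intro j
    induction j with
    | zero => intro i h hj; omega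
    | succ j ih =>
      intro i h hj
      apply hM2 S1[i] (hS1C _ (List.getElem_mem h))
      intro p hp hE
      obtain ⟨ip, hip, hpeq⟩ := List.mem_iff_getElem.mp (hfull1 p hp)
      have hmemtake : S1[i] ∈ S1.take ip := by
        apply hV1 ip hip S1[i] (hS1C _ (List.getElem_mem h))
        rw [hpeq]; exact hE
    -- i < ip from nodup
      obtain ⟨k, hk, hkeq⟩ := List.mem_iff_getElem.mp hmemtake
      have hk2 : k < S1.length := by
        have := List.length_take_le ip S1; omega
      rw [List.getElem_take] at hkeq
      have hki : k = i := by
        have := List.Nodup.getElem_inj_iff hS1n (hi := hk2) (hj := h)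
        exact this.mp hkeq
      have hilt : i < ip := by
        have hlen : (S1.take ip).length = min ip S1.length := List.length_take
        omega
      have : S1[ip] ∈ S2 := ih ip hip (by omega)
      rw [hpeq] at this
      exact this
  intro x hx
  obtain ⟨i, hi, hieq⟩ := List.mem_iff_getElem.mp (hfull1 x hx)
  have := key S1.length i hi (by omega)
  rw [hieq] at this
  exact this

theorem pvFull_iff_len {C S : List Int} (hCn : C.Nodup) (hSn : S.Nodup)
    (hSC : ∀ x ∈ S, x ∈ C) :
    ((∀ x ∈ C, x ∈ S) ↔ C.length ≤ S.length) := by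
  constructor
  · intro h
    exact (List.subperm_of_subset hCn h).length_le
  · intro h
    have hsub : S.Subperm C := List.subperm_of_subset hSn hSC
    have hperm : S.Perm C := hsub.perm_of_length_le h
    intro x hx
    exact hperm.mem_iff.mpr hx

-- ---------- Kahn's loop ----------

theorem pvKahn_inner (N : List Int) (hN : N.Nodup) :
    ∀ (indeg : PySem.Dict Int Int) (rest : List Int),
      (N.foldl pvKahnStep (indeg, rest)).2
          = rest ++ N.filter (fun d => decide (indeg.getD d 0 = 1)) ∧
      ∀ x, (N.foldl pvKahnStep (indeg, rest)).1.getD x 0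
          = indeg.getD x 0 - (if x ∈ N then 1 else 0) := by
  induction N with
  | nil => intro indeg rest; simp
  | cons a t ih =>
    intro indeg rest
    have hat : a ∉ t := (List.nodup_cons.mp hN).1
    have ht : t.Nodup := (List.nodup_cons.mp hN).2
    have step : pvKahnStep (indeg, rest) a
        = (indeg.insert a (indeg.getD a 0 - 1),
           if indeg.getD a 0 = 1 then rest ++ [a] else rest) := by
      unfold pvKahnStep
      simp only [PySem.Dict.getD_insert_self]
      by_cases h : indeg.getD a 0 = 1
      · simp [h]
      · have : ¬ (indeg.getD a 0 - 1 = 0) := by omega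
        simp [this, h]
    obtain ⟨h2, h1⟩ := ih ht (indeg.insert a (indeg.getD a 0 - 1))
      (if indeg.getD a 0 = 1 then rest ++ [a] else rest)
    constructor
    · rw [List.foldl_cons, step, h2]
      simp only [List.filter_cons]
      have hcongr : t.filter (fun d => decide ((indeg.insert a (indeg.getD a 0 - 1)).getD d 0 = 1))
          = t.filter (fun d => decide (indeg.getD d 0 = 1)) := by
        apply List.filter_congr
        intro x hx
        have : x ≠ a := fun h => hat (h ▸ hx)
        rw [PySem.Dict.getD_insert_of_ne _ _ _ this]
      rw [hcongr]
      by_cases h : indeg.getD a 0 = 1 <;> simp [h]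
    · intro x
      rw [List.foldl_cons, step, h1 x]
      by_cases hx : x = a
      · subst hx
        simp [PySem.Dict.getD_insert_self, hat]
      · rw [PySem.Dict.getD_insert_of_ne _ _ _ hx]
        simp [hx]

theorem pvKahn_run (C : List Int) (E : Int → Int → Bool)
    (G : PySem.Dict Int (PySem.Set Int)) (hC : C.Nodup)
    (hG : ∀ c ∈ C, ∀ x, x ∈ G.getD c PySem.Set.empty ↔ E c x = true)
    (hGN : ∀ c, (G.getD c PySem.Set.empty).Nodup)
    (hGC : ∀ c ∈ C, ∀ x ∈ G.getD c PySem.Set.empty, x ∈ C) :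
    ∀ (fuel : Nat) (P Q : List Int) (indeg : PySem.Dict Int Int),
      (∀ x ∈ P, x ∈ C) → (∀ x ∈ Q, x ∈ C) → P.Nodup → Q.Nodup →
      (∀ x ∈ Q, x ∉ P) →
      (∀ d, indeg.getD d 0 = (C.countP (fun c => E c d && decide (c ∉ P)) : Int)) →
      (∀ d ∈ Q, C.countP (fun c => E c d && decide (c ∉ P)) = 0) →
      (∀ d ∈ P, C.countP (fun c => E c d && decide (c ∉ P)) = 0) →
      (∀ d ∈ C, d ∉ P → d ∉ Q → C.countP (fun c => E c d && decide (c ∉ P)) ≠ 0) →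
      pvValid C E P →
      C.length + 1 ≤ fuel + P.length →
      ∃ Pf, Pf.Nodup ∧ (∀ x ∈ Pf, x ∈ C) ∧ pvValid C E Pf ∧ pvMax C E Pf ∧
        pvKahn G fuel Q (P.length : Int) indeg = (Pf.length : Int) := by
  intro fuel
  induction fuel with
  | zero =>
    intro P Q indeg hPC hQC hPn hQn hdisj hind hQ0 hP0 hcov hV hfuel
    have : P.length ≤ C.length := (List.subperm_of_subset hPn hPC).length_le
    omega
  | succ fuel ih =>
    intro P Q indeg hPC hQC hPn hQn hdisj hind hQ0 hP0 hcov hV hfuel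
    cases Q with
    | nil =>
      refine ⟨P, hPn, hPC, hV, ?_, rfl⟩
      intro d hd hready
      by_contra hdP
      apply hcov d hd hdP (by simp)
      rw [List.countP_eq_zero]
      intro a ha
      simp only [Bool.and_eq_true, decide_eq_true_eq, not_and]
      intro hE
      simp [hready a ha hE]
    | cons c rest =>
      have hcC : c ∈ C := hQC c (by simp)
      have hcP : c ∉ P := hdisj c (by simp)
      have hcCnt : C.countP (fun x => E x c && decide (x ∉ P)) = 0 := hQ0 c (by simp)
      have hcrest : c ∉ rest := (List.nodup_cons.mp hQn).1
      have hrestn : rest.Nodup := (List.nodup_cons.mp hQn).2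
      obtain ⟨hq2, hq1⟩ := pvKahn_inner (G.getD c PySem.Set.empty) (hGN c) indeg rest
      set N := G.getD c PySem.Set.empty with hNdef
      have hmemN : ∀ x, x ∈ N ↔ E c x = true := hG c hcC
      have hNC : ∀ x ∈ N, x ∈ C := hGC c hcC
      set P' := P ++ [c] with hP'def
      have hmono : ∀ d, C.countP (fun x => E x d && decide (x ∉ P'))
          ≤ C.countP (fun x => E x d && decide (x ∉ P)) := by
        intro d
        apply List.countP_mono_left
        intro x _ hx
        simp only [Bool.and_eq_true, decide_eq_true_eq, hP'def, List.mem_append] at hx ⊢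
        exact ⟨hx.1, fun h => hx.2 (Or.inl h)⟩
      have hcnt' : ∀ d, C.countP (fun x => E x d && decide (x ∉ P'))
          = C.countP (fun x => E x d && decide (x ∉ P)) - (if E c d = true then 1 else 0) := by
        intro d
        have hpred : (fun x => E x d && decide (x ∉ P'))
            = fun x => (E x d && decide (x ∉ P)) && decide (x ≠ c) := by
          funext x
          simp only [hP'def, List.mem_append, List.mem_singleton, not_or]
          by_cases h1 : x ∈ P <;> by_cases h2 : x = c <;> simp [h1, h2]
        rw [hpred, pvCountP_and_ne C hC c hcC]
        congr 1
        simp [hcP]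
      have hge1 : ∀ d, E c d = true → 1 ≤ C.countP (fun x => E x d && decide (x ∉ P)) := by
        intro d hE
        rw [Nat.succ_le_iff, List.countP_pos_iff]
        exact ⟨c, hcC, by simp [hE, hcP]⟩
      -- the new queue, with the filter predicate rephrased through the invariant
      have hfilter : N.filter (fun d => decide (indeg.getD d 0 = 1))
          = N.filter (fun d => decide (C.countP (fun x => E x d && decide (x ∉ P)) = 1)) := by
        apply List.filter_congr
        intro x _
        rw [hind x]
        simp only [decide_eq_decide]
        exact_mod_cast Iff.rfl
      set A := N.filter (fun d => decide (C.countP (fun x => E x d && decide (x ∉ P)) = 1)) with hAdef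
      have hAmem : ∀ x, x ∈ A ↔ (x ∈ N ∧ C.countP (fun y => E y x && decide (y ∉ P)) = 1) := by
        intro x
        simp [hAdef, List.mem_filter]
      have hstep : pvKahn G (fuel + 1) (c :: rest) (P.length : Int) indeg
          = pvKahn G fuel (rest ++ A) ((P.length : Int) + 1)
              ((N.foldl pvKahnStep (indeg, rest)).1) := by
        simp only [pvKahn]
        rw [hq2, hfilter]
      have hcast : ((P.length : Int) + 1) = (P'.length : Int) := by
        simp [hP'def]
      -- recursive call
      have hPC' : ∀ x ∈ P', x ∈ C := by
        intro x hx
        rcases List.mem_append.mp hx with h | h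
        · exact hPC x h
        · simp at h; subst h; exact hcC
      have hQC' : ∀ x ∈ rest ++ A, x ∈ C := by
        intro x hx
        rcases List.mem_append.mp hx with h | h
        · exact hQC x (by simp [h])
        · exact hNC x ((hAmem x).mp h).1
      have hPn' : P'.Nodup := by
        rw [hP'def, List.nodup_append]
        refine ⟨hPn, List.nodup_singleton c, ?_⟩
        intro a ha b hb hab
        simp at hb; subst hb; subst hab
        exact hcP ha
      have hQn' : (rest ++ A).Nodup := by
        rw [List.nodup_append]
        refine ⟨hrestn, List.Nodup.filter _ (hGN c), ?_⟩
        intro x hx y hy hxy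
        subst hxy
        have h1 := ((hAmem x).mp hy).2
        have := hQ0 x (by simp [hx])
        omega
      have hdisj' : ∀ x ∈ rest ++ A, x ∉ P' := by
        intro x hx hxP'
        rcases List.mem_append.mp hxP' with hxp | hxc
        · rcases List.mem_append.mp hx with h | h
          · exact hdisj x (by simp [h]) hxp
          · have := ((hAmem x).mp h).2
            have := hP0 x hxp
            omega
        · simp at hxc
          subst hxc
          rcases List.mem_append.mp hx with h | h
          · exact hcrest h
          · have h2 := ((hAmem x).mp h).2
            rw [hcCnt] at h2
            exact absurd h2 (by norm_num)
      have hind' : ∀ d, (N.foldl pvKahnStep (indeg, rest)).1.getD d 0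
          = (C.countP (fun x => E x d && decide (x ∉ P')) : Int) := by
        intro d
        rw [hq1 d, hind d, hcnt' d]
        by_cases hE : E c d = true
        · have := hge1 d hE
          have hdN : d ∈ N := (hmemN d).mpr hE
          simp only [hdN, if_true, hE]
          push_cast [Nat.cast_sub this]
          ring
        · have hdN : d ∉ N := fun h => hE ((hmemN d).mp h)
          simp [hdN, hE]
      have hQ0' : ∀ d ∈ rest ++ A, C.countP (fun x => E x d && decide (x ∉ P')) = 0 := by
        intro d hd
        rcases List.mem_append.mp hd with h | h
        · have := hQ0 d (by simp [h])
          have := hmono d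
          omega
        · obtain ⟨hdN, h1⟩ := (hAmem d).mp h
          have hE : E c d = true := (hmemN d).mp hdN
          rw [hcnt' d, if_pos hE, h1]
      have hP0' : ∀ d ∈ P', C.countP (fun x => E x d && decide (x ∉ P')) = 0 := by
        intro d hd
        have hm := hmono d
        rcases List.mem_append.mp hd with h | h
        · have := hP0 d h; omega
        · simp at h; subst h
          rw [hcCnt] at hm; omega
      have hcov' : ∀ d ∈ C, d ∉ P' → d ∉ rest ++ A →
          C.countP (fun x => E x d && decide (x ∉ P')) ≠ 0 := by
        intro d hd hdP' hdQ' h0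
        have hdP : d ∉ P := fun h => hdP' (List.mem_append.mpr (Or.inl h))
        have hdc : d ≠ c := fun h => hdP' (by rw [hP'def, h]; simp)
        have hdrest : d ∉ rest := fun h => hdQ' (List.mem_append.mpr (Or.inl h))
        have hdA : d ∉ A := fun h => hdQ' (List.mem_append.mpr (Or.inr h))
        rw [hcnt' d] at h0
        by_cases hE : E c d = true
        · have h1 := hge1 d hE
          have : C.countP (fun x => E x d && decide (x ∉ P)) = 1 := by
            simp only [hE, if_true] at h0; omega
          exact hdA ((hAmem d).mpr ⟨(hmemN d).mpr hE, this⟩)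
        · simp only [hE, if_false, Nat.sub_zero] at h0
          exact hcov d hd hdP (by simp [hdc, hdrest]) h0
      have hV' : pvValid C E P' := by
        apply pvValid_append hV
        intro p hp hE
        by_contra hpP
        have hpos : 0 < C.countP (fun x => E x c && decide (x ∉ P)) :=
          List.countP_pos_iff.mpr ⟨p, hp, by simp [hE, hpP]⟩
        omega
      have hfuel' : C.length + 1 ≤ fuel + P'.length := by
        simp only [hP'def, List.length_append, List.length_cons, List.length_nil]
        omega
      obtain ⟨Pf, h1, h2, h3, h4, h5⟩ := ih P' (rest ++ A)
        ((N.foldl pvKahnStep (indeg, rest)).1) hPC' hQC' hPn' hQn' hdisj' hind' hQ0' hP0' hcov' hV' hfuel'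
      exact ⟨Pf, h1, h2, h3, h4, by rw [hstep, hcast]; exact h5⟩

-- ---------- grid-level data ----------

def pvIdx (m n : Int) : List (Int × Int) :=
  (PySem.List.pyRange 0 m).flatMap (fun i => (PySem.List.pyRange 0 n).map (fun j => (i, j)))

def pvCellList (g : List (List Int)) (m n : Int) : List Int :=
  (pvIdx m n).map (fun p => pvCell g p.1 p.2)

def pvT2L (t : Int × Int × Int × Int) : List Int := [t.1, t.2.1, t.2.2.1, t.2.2.2]

def pvBoxVals (g : List (List Int)) (t : Int × Int × Int × Int) : List Int :=
  ((PySem.List.pyRange t.1 (t.2.1 + 1)).flatMap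
    (fun i => (PySem.List.pyRange t.2.2.1 (t.2.2.2 + 1)).map (fun j => (i, j)))).map
    (fun p => pvCell g p.1 p.2)

-- the dependency relation: pvE g bd c d ↔ a cell of colour d ≠ c lies in c's box
def pvE (g : List (List Int)) (bd : PySem.Dict Int (Int × Int × Int × Int)) (c d : Int) : Bool :=
  decide (d ≠ c) && decide (d ∈ pvBoxVals g (bd.getD c (0, 0, 0, 0)))

-- ---------- flat-scan forms of the two phase-1 folds ----------

theorem mem_pvIdx {m n : Int} {p : Int × Int} :
    p ∈ pvIdx m n ↔ 0 ≤ p.1 ∧ p.1 < m ∧ 0 ≤ p.2 ∧ p.2 < n := by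
  obtain ⟨i, j⟩ := p
  unfold pvIdx
  simp [List.mem_flatMap, List.mem_map, PySem.List.mem_pyRange_one]
  tauto

theorem pvStep1_eq (g : List (List Int)) (m n : Int) :
    pvStep1 g m n = (pvIdx m n).foldl (fun st p => pvStep1F g st p)
      (PySem.Set.empty, PySem.Dict.empty) := by
  unfold pvStep1 pvIdx
  rw [pvFoldlNested _ _ (fun st i j => pvStep1F g st (i, j))]

theorem pvBounds_eq (g : List (List Int)) (m n : Int) :
    pvBounds g m n = (pvIdx m n).foldl (fun bd p => pvBoundsF g bd p) PySem.Dict.empty := by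
  unfold pvBounds pvIdx
  rw [pvFoldlNested _ _ (fun bd i j => pvBoundsF g bd (i, j))]

theorem pvStep1F_fst (g : List (List Int)) (st : PySem.Set Int × PySem.Dict Int (List Int))
    (p : Int × Int) : (pvStep1F g st p).1 = PySem.Set.add st.1 (pvCell g p.1 p.2) := by
  unfold pvStep1F
  dsimp only
  split <;> rfl

-- bounds-only form of A's step-1 body (second component)
def pvStep1B (g : List (List Int)) (bounds : PySem.Dict Int (List Int)) (p : Int × Int) :
    PySem.Dict Int (List Int) :=
  let c := pvCell g p.1 p.2
  if bounds.contains c then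
    let b := bounds.getD c []
    let b := b.set 0 (min (PySem.List.pyGetD b 0 0) p.1)
    let b := b.set 1 (max (PySem.List.pyGetD b 1 0) p.1)
    let b := b.set 2 (min (PySem.List.pyGetD b 2 0) p.2)
    let b := b.set 3 (max (PySem.List.pyGetD b 3 0) p.2)
    bounds.insert c b
  else
    bounds.insert c [p.1, p.1, p.2, p.2]

theorem pvStep1F_snd (g : List (List Int)) (st : PySem.Set Int × PySem.Dict Int (List Int))
    (p : Int × Int) : (pvStep1F g st p).2 = pvStep1B g st.2 p := by
  unfold pvStep1F pvStep1B
  dsimp only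
  split <;> rfl

theorem pvStep1_fold_split (g : List (List Int)) :
    ∀ (L : List (Int × Int)) (s : PySem.Set Int) (d : PySem.Dict Int (List Int)),
      (L.foldl (fun st p => pvStep1F g st p) (s, d)).1
          = PySem.Set.update s (L.map (fun p => pvCell g p.1 p.2)) ∧
      (L.foldl (fun st p => pvStep1F g st p) (s, d)).2
          = L.foldl (fun bd p => pvStep1B g bd p) d := by
  intro L
  induction L with
  | nil => intro s d; exact ⟨rfl, rfl⟩
  | cons a t ih =>
    intro s d
    have hsplit : pvStep1F g (s, d) a
        = (PySem.Set.add s (pvCell g a.1 a.2), pvStep1B g d a) := by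
      have h1 := pvStep1F_fst g (s, d) a
      have h2 := pvStep1F_snd g (s, d) a
      exact Prod.ext h1 h2
    rw [List.foldl_cons, List.foldl_cons, hsplit]
    exact ih (PySem.Set.add s (pvCell g a.1 a.2)) (pvStep1B g d a)

-- B's phase-1 body in insert-at-key form
def pvBoundsVal (g : List (List Int)) (bd : PySem.Dict Int (Int × Int × Int × Int))
    (p : Int × Int) : Int × Int × Int × Int :=
  match bd.get? (pvCell g p.1 p.2) with
  | some (r1, r2, c1, c2) => (min r1 p.1, max r2 p.1, min c1 p.2, max c2 p.2)
  | none => (p.1, p.1, p.2, p.2)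

theorem pvBoundsF_insert (g : List (List Int)) (bd : PySem.Dict Int (Int × Int × Int × Int))
    (p : Int × Int) :
    pvBoundsF g bd p = bd.insert (pvCell g p.1 p.2) (pvBoundsVal g bd p) := by
  unfold pvBoundsF pvBoundsVal
  dsimp only
  rcases bd.get? (pvCell g p.1 p.2) with _ | ⟨r1, r2, c1, c2⟩ <;> rfl

theorem pvBounds_rel_fold (g : List (List Int)) :
    ∀ (L : List (Int × Int)) (dA : PySem.Dict Int (List Int))
      (dB : PySem.Dict Int (Int × Int × Int × Int)),
      (∀ c, dA.get? c = (dB.get? c).map pvT2L) →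
      ∀ c, (L.foldl (fun bd p => pvStep1B g bd p) dA).get? c
          = ((L.foldl (fun bd p => pvBoundsF g bd p) dB).get? c).map pvT2L := by
  intro L
  induction L with
  | nil => intro dA dB h c; exact h c
  | cons a t ih =>
    intro dA dB h c
    rw [List.foldl_cons, List.foldl_cons]
    apply ih
    intro x
    have hcont : dA.contains (pvCell g a.1 a.2) = dB.contains (pvCell g a.1 a.2) := by
      rw [PySem.Dict.contains_eq_isSome_get?, PySem.Dict.contains_eq_isSome_get?, h]
      rcases dB.get? (pvCell g a.1 a.2) with _ | t0 <;> rfl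
    rw [pvBoundsF_insert]
    rcases hB : dB.get? (pvCell g a.1 a.2) with _ | ⟨r1, r2, c1, c2⟩
    · have hcf : dA.contains (pvCell g a.1 a.2) = false := by
        rw [hcont, PySem.Dict.contains_eq_isSome_get?, hB]; rfl
      unfold pvStep1B
      dsimp only
      rw [hcf]
      simp only [Bool.false_eq_true, if_false]
      rw [PySem.Dict.get?_insert, PySem.Dict.get?_insert]
      by_cases hx : x = pvCell g a.1 a.2
      · rw [if_pos hx, if_pos hx]
        unfold pvBoundsVal
        rw [hB]
        rfl
      · rw [if_neg hx, if_neg hx]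
        exact h x
    · have hct : dA.contains (pvCell g a.1 a.2) = true := by
        rw [hcont, PySem.Dict.contains_eq_isSome_get?, hB]; rfl
      have hgd : dA.getD (pvCell g a.1 a.2) [] = [r1, r2, c1, c2] := by
        rw [PySem.Dict.getD_eq_get?_getD, h, hB]; rfl
      unfold pvStep1B
      dsimp only
      rw [hct]
      simp only [if_true]
      rw [hgd]
      rw [PySem.Dict.get?_insert, PySem.Dict.get?_insert]
      by_cases hx : x = pvCell g a.1 a.2
      · rw [if_pos hx, if_pos hx]
        unfold pvBoundsVal
        rw [hB]
        rfl
      · rw [if_neg hx, if_neg hx]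
        exact h x

-- ---------- phase-1 characterisation ----------

theorem pvStep1_fst_char (g : List (List Int)) (m n : Int) :
    (pvStep1 g m n).1 = PySem.Set.ofList (pvCellList g m n) := by
  rw [pvStep1_eq]
  rw [(pvStep1_fold_split g (pvIdx m n) PySem.Set.empty PySem.Dict.empty).1]
  rw [PySem.Set.ofList_eq_foldl]
  rfl

theorem pvStep1_snd_char (g : List (List Int)) (m n : Int) :
    ∀ c, (pvStep1 g m n).2.get? c = ((pvBounds g m n).get? c).map pvT2L := by
  intro c
  rw [pvStep1_eq, pvBounds_eq]
  rw [(pvStep1_fold_split g (pvIdx m n) PySem.Set.empty PySem.Dict.empty).2]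
  apply pvBounds_rel_fold
  intro x
  rfl

theorem pvBounds_keys (g : List (List Int)) (m n : Int) :
    (pvBounds g m n).keys = PySem.Set.ofList (pvCellList g m n) := by
  rw [pvBounds_eq]
  have hfn : (fun bd p => pvBoundsF g bd p)
      = fun (bd : PySem.Dict Int (Int × Int × Int × Int)) p =>
          bd.insert (pvCell g p.1 p.2) (pvBoundsVal g bd p) := by
    funext bd p
    exact pvBoundsF_insert g bd p
  rw [hfn, PySem.Dict.keys_foldl_insert_key]
  rw [PySem.Set.ofList_eq_foldl]
  rfl

theorem pvBounds_range (g : List (List Int)) (m n : Int) :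
    ∀ c t, (pvBounds g m n).get? c = some t →
      0 ≤ t.1 ∧ t.1 ≤ t.2.1 ∧ t.2.1 < m ∧ 0 ≤ t.2.2.1 ∧ t.2.2.1 ≤ t.2.2.2 ∧ t.2.2.2 < n := by
  rw [pvBounds_eq]
  have key : ∀ (L : List (Int × Int)), (∀ p ∈ L, 0 ≤ p.1 ∧ p.1 < m ∧ 0 ≤ p.2 ∧ p.2 < n) →
      ∀ (dB : PySem.Dict Int (Int × Int × Int × Int)),
        (∀ c t, dB.get? c = some t →
          0 ≤ t.1 ∧ t.1 ≤ t.2.1 ∧ t.2.1 < m ∧ 0 ≤ t.2.2.1 ∧ t.2.2.1 ≤ t.2.2.2 ∧ t.2.2.2 < n) →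
        ∀ c t, (L.foldl (fun bd p => pvBoundsF g bd p) dB).get? c = some t →
          0 ≤ t.1 ∧ t.1 ≤ t.2.1 ∧ t.2.1 < m ∧ 0 ≤ t.2.2.1 ∧ t.2.2.1 ≤ t.2.2.2 ∧ t.2.2.2 < n := by
    intro L
    induction L with
    | nil => intro _ dB hdB c t h; exact hdB c t h
    | cons a tl ih =>
      intro hL dB hdB c t h
      rw [List.foldl_cons] at h
      refine ih (fun p hp => hL p (by simp [hp])) _ ?_ c t h
      intro c' t' h'
      rw [pvBoundsF_insert, PySem.Dict.get?_insert] at h'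
      obtain ⟨ha1, ha2, ha3, ha4⟩ := hL a (by simp)
      by_cases hx : c' = pvCell g a.1 a.2
      · rw [if_pos hx] at h'
        injection h' with h'
        subst h'
        unfold pvBoundsVal
        rcases hB : dB.get? (pvCell g a.1 a.2) with _ | ⟨r1, r2, c1, c2⟩
        · dsimp only
          omega
        · obtain ⟨h1, h2, h3, h4, h5, h6⟩ := hdB _ _ hB
          dsimp only at h1 h2 h3 h4 h5 h6 ⊢
          omega
      · rw [if_neg hx] at h'
        exact hdB c' t' h'
  apply key
  · intro p hp
    exact mem_pvIdx.mp hp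
  · intro c t h
    rw [PySem.Dict.get?_empty] at h
    exact absurd h (by simp)

theorem pvBoxVals_sub (g : List (List Int)) (m n : Int) (c : Int)
    (hc : c ∈ PySem.Set.ofList (pvCellList g m n)) :
    ∀ x ∈ pvBoxVals g ((pvBounds g m n).getD c (0, 0, 0, 0)), x ∈ pvCellList g m n := by
  intro x hx
  have hkeys : c ∈ (pvBounds g m n).keys := by
    rw [pvBounds_keys]
    exact hc
  have hcont : (pvBounds g m n).contains c = true :=
    (PySem.Dict.contains_iff_mem_keys _ _).mpr hkeys
  rcases hg : (pvBounds g m n).get? c with _ | t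
  · rw [PySem.Dict.contains_eq_isSome_get?, hg] at hcont
    exact absurd hcont (by simp)
  · have hgd : (pvBounds g m n).getD c (0, 0, 0, 0) = t := by
      rw [PySem.Dict.getD_eq_get?_getD, hg]; rfl
    rw [hgd] at hx
    obtain ⟨h1, h2, h3, h4, h5, h6⟩ := pvBounds_range g m n c t hg
    unfold pvBoxVals at hx
    rw [List.mem_map] at hx
    obtain ⟨p, hp, hpx⟩ := hx
    rw [List.mem_flatMap] at hp
    obtain ⟨i, hi, hp2⟩ := hp
    rw [List.mem_map] at hp2
    obtain ⟨j, hj, hp3⟩ := hp2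
    rw [PySem.List.mem_pyRange_one] at hi hj
    subst hp3
    unfold pvCellList
    rw [List.mem_map]
    refine ⟨(i, j), mem_pvIdx.mpr ⟨by omega, by omega, by omega, by omega⟩, hpx⟩

-- ---------- phase-2 characterisation (A only) ----------

theorem pvStep2_inner (c : Int) :
    ∀ (V : List Int) (G : PySem.Dict Int (PySem.Set Int)) (I : PySem.Dict Int Int),
      (∀ x, (V.foldl (pvStep2V c) (G, I)).1.getD x PySem.Set.empty
          = if x = c then PySem.Set.update (G.getD c PySem.Set.empty) (V.filter (· ≠ c))
            else G.getD x PySem.Set.empty) ∧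
      (∀ d, (V.foldl (pvStep2V c) (G, I)).2.getD d 0
          = I.getD d 0 + (if d ∈ V ∧ d ≠ c ∧ d ∉ G.getD c PySem.Set.empty then 1 else 0)) := by
  intro V
  induction V with
  | nil =>
    intro G I
    refine ⟨fun x => ?_, fun d => ?_⟩
    · by_cases hx : x = c <;> simp [hx, PySem.Set.update, List.filter_nil]
    · simp
  | cons d0 V' ih =>
    intro G I
    rw [List.foldl_cons]
    by_cases hd0 : d0 = c
    · have hstep : pvStep2V c (G, I) d0 = (G, I) := by
        unfold pvStep2V
        rw [if_neg (by simp [hd0])]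
      rw [hstep]
      obtain ⟨ih1, ih2⟩ := ih G I
      refine ⟨fun x => ?_, fun d => ?_⟩
      · rw [ih1 x]
        by_cases hx : x = c
        · rw [if_pos hx, if_pos hx]
          have hfil : (d0 :: V').filter (· ≠ c) = V'.filter (· ≠ c) := by
            simp [hd0]
          rw [hfil]
        · rw [if_neg hx, if_neg hx]
      · rw [ih2 d]
        congr 1
        apply if_congr ?_ rfl rfl
        simp only [List.mem_cons]
        constructor
        · rintro ⟨h1, h2, h3⟩
          exact ⟨Or.inr h1, h2, h3⟩
        · rintro ⟨h1 | h1, h2, h3⟩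
          · rw [h1, hd0] at h2; exact absurd rfl h2
          · exact ⟨h1, h2, h3⟩
    · by_cases hmem : (G.getD c PySem.Set.empty).contains d0 = true
      · have hd0gc : d0 ∈ G.getD c PySem.Set.empty :=
          (PySem.Set.contains_iff _ _).mp hmem
        have hstep : pvStep2V c (G, I) d0 = (G, I) := by
          unfold pvStep2V
          rw [if_pos hd0]
          dsimp only
          rw [hmem]
          rfl
        rw [hstep]
        obtain ⟨ih1, ih2⟩ := ih G I
        have hadd : (G.getD c PySem.Set.empty).add d0 = G.getD c PySem.Set.empty := by
          unfold PySem.Set.add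
          rw [hmem]
          rfl
        refine ⟨fun x => ?_, fun d => ?_⟩
        · rw [ih1 x]
          by_cases hx : x = c
          · rw [if_pos hx, if_pos hx]
            have hfil : (d0 :: V').filter (· ≠ c) = d0 :: V'.filter (· ≠ c) := by
              simp [hd0]
            rw [hfil]
            have hupd : PySem.Set.update (G.getD c PySem.Set.empty) (d0 :: V'.filter (· ≠ c))
                = PySem.Set.update ((G.getD c PySem.Set.empty).add d0) (V'.filter (· ≠ c)) := rfl
            rw [hupd, hadd]
          · rw [if_neg hx, if_neg hx]
        · rw [ih2 d]
          congr 1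
          apply if_congr ?_ rfl rfl
          simp only [List.mem_cons]
          constructor
          · rintro ⟨h1, h2, h3⟩
            exact ⟨Or.inr h1, h2, h3⟩
          · rintro ⟨h1 | h1, h2, h3⟩
            · rw [h1] at h3; exact absurd hd0gc h3
            · exact ⟨h1, h2, h3⟩
      · have hd0gc : d0 ∉ G.getD c PySem.Set.empty := by
          intro hcon
          exact hmem ((PySem.Set.contains_iff _ _).mpr hcon)
        have hstep : pvStep2V c (G, I) d0
            = (G.insert c ((G.getD c PySem.Set.empty).add d0),
               I.insert d0 (I.getD d0 0 + 1)) := by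
          unfold pvStep2V
          rw [if_pos hd0]
          dsimp only
          rw [Bool.eq_false_iff.mpr hmem]
          rfl
        rw [hstep]
        obtain ⟨ih1, ih2⟩ := ih (G.insert c ((G.getD c PySem.Set.empty).add d0))
          (I.insert d0 (I.getD d0 0 + 1))
        refine ⟨fun x => ?_, fun d => ?_⟩
        · rw [ih1 x]
          by_cases hx : x = c
          · rw [if_pos hx, if_pos hx]
            subst hx
            rw [PySem.Dict.getD_insert_self]
            have hfil : (d0 :: V').filter (· ≠ x) = d0 :: V'.filter (· ≠ x) := by
              simp [hd0]
            rw [hfil]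
            rfl
          · rw [if_neg hx, if_neg hx]
            rw [PySem.Dict.getD_insert_of_ne _ _ _ hx]
        · rw [ih2 d]
          simp only [PySem.Dict.getD_insert_self]
          by_cases hd : d = d0
          · subst hd
            rw [PySem.Dict.getD_insert_self]
            have hc1 : ¬ (d ∈ V' ∧ d ≠ c ∧ d ∉ (G.getD c PySem.Set.empty).add d) := by
              rintro ⟨_, _, h3⟩
              exact h3 ((PySem.Set.mem_add _ _ _).mpr (Or.inr rfl))
            have hc2 : d ∈ d :: V' ∧ d ≠ c ∧ d ∉ G.getD c PySem.Set.empty :=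
              ⟨by simp, hd0, hd0gc⟩
            rw [if_neg hc1, if_pos hc2]
            ring
          · rw [PySem.Dict.getD_insert_of_ne _ _ _ hd]
            congr 1
            apply if_congr ?_ rfl rfl
            simp only [List.mem_cons]
            constructor
            · rintro ⟨h1, h2, h3⟩
              refine ⟨Or.inr h1, h2, fun hcon => ?_⟩
              exact h3 ((PySem.Set.mem_add _ _ _).mpr (Or.inl hcon))
            · rintro ⟨h1 | h1, h2, h3⟩
              · exact absurd h1 hd
              · refine ⟨h1, h2, fun hcon => ?_⟩
                rcases (PySem.Set.mem_add _ _ _).mp hcon with h | h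
                · exact h3 h
                · exact hd h

theorem pvStep2C_eq (g : List (List Int)) (m n : Int) (c : Int)
    (t : Int × Int × Int × Int) (hB : (pvBounds g m n).get? c = some t)
    (st : PySem.Dict Int (PySem.Set Int) × PySem.Dict Int Int) :
    pvStep2C g (pvStep1 g m n).2 st c = (pvBoxVals g t).foldl (pvStep2V c) st := by
  unfold pvStep2C
  have hb : (pvStep1 g m n).2.getD c [] = pvT2L t := by
    rw [PySem.Dict.getD_eq_get?_getD, pvStep1_snd_char g m n c, hB]
    rfl
  rw [hb]
  obtain ⟨r1, r2, c1, c2⟩ := t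
  show (PySem.List.pyRange r1 (r2 + 1)).foldl
      (fun st i => (PySem.List.pyRange c1 (c2 + 1)).foldl
        (fun st j => pvStep2V c st (pvCell g i j)) st) st = _
  rw [pvFoldlNested _ _ (fun st i j => pvStep2V c st (pvCell g i j))]
  unfold pvBoxVals
  rw [List.foldl_map]

theorem pvBoundsGetD_eq (g : List (List Int)) (m n : Int) (c : Int)
    (t : Int × Int × Int × Int) (hB : (pvBounds g m n).get? c = some t) :
    (pvBounds g m n).getD c (0, 0, 0, 0) = t := by
  rw [PySem.Dict.getD_eq_get?_getD, hB]
  rfl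

theorem pvGetSome_of_mem (g : List (List Int)) (m n : Int) (c : Int)
    (hc : c ∈ PySem.Set.ofList (pvCellList g m n)) :
    ∃ t, (pvBounds g m n).get? c = some t := by
  have hkeys : c ∈ (pvBounds g m n).keys := by
    rw [pvBounds_keys]; exact hc
  have hcont : (pvBounds g m n).contains c = true :=
    (PySem.Dict.contains_iff_mem_keys _ _).mpr hkeys
  rcases hg : (pvBounds g m n).get? c with _ | t
  · rw [PySem.Dict.contains_eq_isSome_get?, hg] at hcont
    exact absurd hcont (by simp)
  · exact ⟨t, rfl⟩

theorem pvE_iff (g : List (List Int)) (m n : Int) (c x : Int)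
    (t : Int × Int × Int × Int) (hB : (pvBounds g m n).get? c = some t) :
    pvE g (pvBounds g m n) c x = true ↔ (x ∈ pvBoxVals g t ∧ x ≠ c) := by
  unfold pvE
  rw [pvBoundsGetD_eq g m n c t hB]
  simp only [Bool.and_eq_true, decide_eq_true_eq]
  tauto

theorem pvStep2_outer (g : List (List Int)) (m n : Int) :
    ∀ (L Cp : List Int) (G : PySem.Dict Int (PySem.Set Int)) (I : PySem.Dict Int Int),
      (∀ c ∈ L, c ∈ PySem.Set.ofList (pvCellList g m n)) →
      (Cp ++ L).Nodup →
      (∀ c ∈ Cp, ∀ x, x ∈ G.getD c PySem.Set.empty ↔ pvE g (pvBounds g m n) c x = true) →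
      (∀ c, c ∉ Cp → G.getD c PySem.Set.empty = PySem.Set.empty) →
      (∀ c, (G.getD c PySem.Set.empty).Nodup) →
      (∀ d, I.getD d 0 = (Cp.countP (fun c => pvE g (pvBounds g m n) c d) : Int)) →
      (∀ c ∈ Cp ++ L, ∀ x,
          x ∈ (L.foldl (pvStep2C g (pvStep1 g m n).2) (G, I)).1.getD c PySem.Set.empty ↔
            pvE g (pvBounds g m n) c x = true) ∧
      (∀ c, ((L.foldl (pvStep2C g (pvStep1 g m n).2) (G, I)).1.getD c PySem.Set.empty).Nodup) ∧
      (∀ d, (L.foldl (pvStep2C g (pvStep1 g m n).2) (G, I)).2.getD d 0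
          = ((Cp ++ L).countP (fun c => pvE g (pvBounds g m n) c d) : Int)) := by
  intro L
  induction L with
  | nil =>
    intro Cp G I _ _ hG1 _ hG3 hI
    refine ⟨?_, hG3, ?_⟩
    · intro c hc x
      exact hG1 c (by simpa using hc) x
    · intro d
      simp only [List.foldl_nil]
      rw [hI d]
      simp
  | cons c L' ih =>
    intro Cp G I hL hnd hG1 hG2 hG3 hI
    have hcC : c ∈ PySem.Set.ofList (pvCellList g m n) := hL c (by simp)
    obtain ⟨t, hB⟩ := pvGetSome_of_mem g m n c hcC
    have hcCp : c ∉ Cp := by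
      rw [List.nodup_append] at hnd
      intro hcon
      exact hnd.2.2 c hcon c (by simp) rfl
    rw [List.foldl_cons, pvStep2C_eq g m n c t hB]
    obtain ⟨hin1, hin2⟩ := pvStep2_inner c (pvBoxVals g t) G I
    -- the state after processing c
    set st' := (pvBoxVals g t).foldl (pvStep2V c) (G, I) with hst'
    have hGc : G.getD c PySem.Set.empty = PySem.Set.empty := hG2 c hcCp
    have hnewc : ∀ x, x ∈ st'.1.getD c PySem.Set.empty ↔ pvE g (pvBounds g m n) c x = true := by
      intro x
      rw [hin1 c, if_pos rfl, hGc]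
      rw [pvMem_update]
      rw [pvE_iff g m n c x t hB]
      constructor
      · rintro (h | h)
        · exact absurd h (by simp [PySem.Set.empty])
        · rw [List.mem_filter] at h
          exact ⟨h.1, by simpa using h.2⟩
      · rintro ⟨h1, h2⟩
        refine Or.inr ?_
        rw [List.mem_filter]
        exact ⟨h1, by simpa using h2⟩
    have hst1 : ∀ x, x ≠ c → st'.1.getD x PySem.Set.empty = G.getD x PySem.Set.empty := by
      intro x hx
      rw [hin1 x, if_neg hx]
    obtain ⟨r1, r2, r3⟩ := ih (Cp ++ [c]) st'.1 st'.2
      (fun a ha => hL a (by simp [ha]))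
      (by rwa [List.append_assoc])
      (by
        intro a ha x
        rcases List.mem_append.mp ha with h | h
        · have hac : a ≠ c := by
            intro hcon
            subst hcon
            exact hcCp h
          rw [hst1 a hac]
          exact hG1 a h x
        · simp at h
          subst h
          exact hnewc x)
      (by
        intro a ha
        have hac : a ≠ c := by
          intro hcon
          subst hcon
          exact ha (by simp)
        have haCp : a ∉ Cp := fun h => ha (by simp [h])
        rw [hst1 a hac]
        exact hG2 a haCp)
      (by
        intro a
        by_cases hac : a = c
        · subst hac
          have := hin1 a
          rw [if_pos rfl] at this
          rw [this]
          exact pvNodup_update (by rw [hGc]; exact List.nodup_nil) _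
        · rw [hst1 a hac]
          exact hG3 a)
      (by
        intro d
        rw [hin2 d, hI d]
        have hif : (if d ∈ pvBoxVals g t ∧ d ≠ c ∧ d ∉ G.getD c PySem.Set.empty
              then (1 : Int) else 0)
            = ((List.countP (fun c => pvE g (pvBounds g m n) c d) [c] : Nat) : Int) := by
          by_cases hE : pvE g (pvBounds g m n) c d = true
          · have hcond : d ∈ pvBoxVals g t ∧ d ≠ c ∧ d ∉ G.getD c PySem.Set.empty := by
              obtain ⟨h1, h2⟩ := (pvE_iff g m n c d t hB).mp hE
              exact ⟨h1, h2, by rw [hGc]; simp [PySem.Set.empty]⟩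
            rw [if_pos hcond]
            simp [List.countP_cons, hE]
          · have hcond : ¬ (d ∈ pvBoxVals g t ∧ d ≠ c ∧ d ∉ G.getD c PySem.Set.empty) := by
              rintro ⟨h1, h2, _⟩
              exact hE ((pvE_iff g m n c d t hB).mpr ⟨h1, h2⟩)
            rw [if_neg hcond]
            simp [List.countP_cons, Bool.eq_false_iff.mpr hE]
        rw [hif, List.countP_append]
        push_cast
        ring)
    refine ⟨?_, r2, ?_⟩
    · intro a ha x
      apply r1
      rcases List.mem_append.mp ha with h | h
      · exact List.mem_append.mpr (Or.inl (List.mem_append.mpr (Or.inl h)))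
      · rcases List.mem_cons.mp h with h' | h'
        · exact List.mem_append.mpr (Or.inl (List.mem_append.mpr (Or.inr (by simp [h']))))
        · exact List.mem_append.mpr (Or.inr h')
    · intro d
      rw [r3 d]
      congr 2
      rw [List.append_assoc]
      rfl

theorem pvStep2_char (g : List (List Int)) (m n : Int)
    (C : List Int) (hC : C = PySem.Set.ofList (pvCellList g m n)) :
    (∀ c ∈ C, ∀ x, x ∈ (pvStep2 g C (pvStep1 g m n).2).1.getD c PySem.Set.empty ↔
        pvE g (pvBounds g m n) c x = true) ∧
    (∀ c, ((pvStep2 g C (pvStep1 g m n).2).1.getD c PySem.Set.empty).Nodup) ∧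
    (∀ d, (pvStep2 g C (pvStep1 g m n).2).2.getD d 0
        = (C.countP (fun c => pvE g (pvBounds g m n) c d) : Int)) := by
  subst hC
  unfold pvStep2
  have := pvStep2_outer g m n (PySem.Set.ofList (pvCellList g m n)) []
    PySem.Dict.empty PySem.Dict.empty
    (fun c hc => hc)
    (by simpa using PySem.Set.nodup_ofList (pvCellList g m n))
    (by intro c hc; simp at hc)
    (by intro c _; rfl)
    (by intro c; exact List.nodup_nil)
    (by intro d; simp)
  obtain ⟨r1, r2, r3⟩ := this
  refine ⟨?_, r2, ?_⟩
  · intro c hc x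
    exact r1 c (by simpa using hc) x
  · intro d
    rw [r3 d]
    simp

-- ---------- B's peel loop ----------

-- the erase test, read through the dependency relation
theorem pvBoxOk_iff (g : List (List Int)) (bd : PySem.Dict Int (Int × Int × Int × Int))
    (c : Int) (er : PySem.Set Int) :
    pvBoxOk g (bd.getD c (0, 0, 0, 0)) c er = true ↔
      ∀ p, pvE g bd c p = true → p ∈ er := by
  unfold pvBoxOk pvE pvBoxVals
  constructor
  · intro h p hp
    simp only [Bool.and_eq_true, decide_eq_true_eq, List.mem_map, List.mem_flatMap] at hp
    obtain ⟨hne, q, ⟨i, hi, hq⟩, hqv⟩ := hp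
    obtain ⟨j, hj, hq2⟩ := hq
    rw [List.all_eq_true] at h
    have := h i hi
    rw [List.all_eq_true] at this
    have h2 := this j hj
    subst hq2
    dsimp only at hqv
    rw [hqv] at h2
    rcases Bool.or_eq_true_iff.mp h2 with h3 | h3
    · exact absurd (by simpa using h3) hne
    · exact (PySem.Set.contains_iff _ _).mp h3
  · intro h
    rw [List.all_eq_true]
    intro i hi
    rw [List.all_eq_true]
    intro j hj
    by_cases hc : pvCell g i j = c
    · simp [hc]
    · have hmem : pvCell g i j ∈ er := by
        apply h
        simp only [Bool.and_eq_true, decide_eq_true_eq, List.mem_map, List.mem_flatMap]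
        exact ⟨hc, (i, j), ⟨i, hi, ⟨j, hj, rfl⟩⟩, rfl⟩
      simp [PySem.Set.contains_iff]
      exact Or.inr hmem

theorem pvPass_ext (g : List (List Int)) (bd : PySem.Dict Int (Int × Int × Int × Int)) :
    ∀ (L : List Int) (st : PySem.Set Int × Bool),
      ∃ ext, (L.foldl (pvPassF g bd) st).1 = st.1 ++ ext ∧
        (L.foldl (pvPassF g bd) st).2 = (st.2 || !ext.isEmpty) := by
  intro L
  induction L with
  | nil => intro st; exact ⟨[], by simp⟩
  | cons a t ih =>
    intro st
    obtain ⟨ext, h1, h2⟩ := ih (pvPassF g bd st a)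
    unfold pvPassF at *
    by_cases hc : (!st.1.contains a && pvBoxOk g (bd.getD a (0, 0, 0, 0)) a st.1) = true
    · have hnc : st.1.contains a = false := by
        rcases Bool.and_eq_true_iff.mp hc with ⟨h, _⟩
        simpa using h
      refine ⟨a :: ext, ?_, ?_⟩
      · rw [List.foldl_cons]
        simp only [hc, if_true] at h1 ⊢
        rw [h1]
        show PySem.Set.add st.1 a ++ ext = st.1 ++ a :: ext
        unfold PySem.Set.add
        rw [hnc]
        simp
      · rw [List.foldl_cons]
        simp only [hc, if_true] at h2 ⊢
        rw [h2]
        simp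
    · rw [List.foldl_cons]
      simp only [hc, if_false] at h1 h2
      rw [if_neg (by simpa using hc)] at *
      exact ⟨ext, h1, h2⟩

theorem pvPass_inv (g : List (List Int)) (bd : PySem.Dict Int (Int × Int × Int × Int))
    (C : List Int) (E : Int → Int → Bool) (hE : E = pvE g bd) :
    ∀ (L : List Int), (∀ x ∈ L, x ∈ C) →
      ∀ (st : PySem.Set Int × Bool), st.1.Nodup → (∀ x ∈ st.1, x ∈ C) →
        pvValid C (fun p d => E d p) st.1 →
        (L.foldl (pvPassF g bd) st).1.Nodup ∧
        (∀ x ∈ (L.foldl (pvPassF g bd) st).1, x ∈ C) ∧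
        pvValid C (fun p d => E d p) (L.foldl (pvPassF g bd) st).1 := by
  intro L
  induction L with
  | nil => intro _ st h1 h2 h3; exact ⟨h1, h2, h3⟩
  | cons a t ih =>
    intro hL st h1 h2 h3
    rw [List.foldl_cons]
    apply ih (fun x hx => hL x (by simp [hx]))
    all_goals unfold pvPassF
    all_goals by_cases hc : (!st.1.contains a && pvBoxOk g (bd.getD a (0, 0, 0, 0)) a st.1) = true
    · rw [if_pos hc]
      exact PySem.Set.nodup_add st.1 a h1
    · rw [if_neg hc]; exact h1
    · rw [if_pos hc]
      intro x hx
      rcases (PySem.Set.mem_add st.1 a x).mp hx with h | h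
      · exact h2 x h
      · subst h; exact hL x (by simp)
    · rw [if_neg hc]; exact h2
    · rw [if_pos hc]
      show pvValid C (fun p d => E d p) (PySem.Set.add st.1 a)
      rcases Bool.and_eq_true_iff.mp hc with ⟨hna, hok⟩
      have hnc : st.1.contains a = false := by simpa using hna
      have : PySem.Set.add st.1 a = st.1 ++ [a] := by
        unfold PySem.Set.add; rw [hnc]; simp
      rw [this]
      apply pvValid_append h3
      intro p _ hEp
      have := (pvBoxOk_iff g bd a st.1).mp hok p
      rw [← hE] at this
      exact this hEp
    · rw [if_neg hc]; exact h3

theorem pvPass_ready (g : List (List Int)) (bd : PySem.Dict Int (Int × Int × Int × Int))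
    (C : List Int) (E : Int → Int → Bool) (hE : E = pvE g bd)
    (acc0 : PySem.Set Int) :
    ∀ (L : List Int) (st : PySem.Set Int × Bool) (d : Int), d ∈ L →
      (∀ p, E d p = true → p ∈ acc0) → (∀ x ∈ acc0, x ∈ st.1) →
      d ∈ (L.foldl (pvPassF g bd) st).1 := by
  intro L
  induction L with
  | nil => intro st d hd; simp at hd
  | cons a t ih =>
    intro st d hd hready hsub
    have hstep_sub : ∀ x ∈ st.1, x ∈ (pvPassF g bd st a).1 := by
      intro x hx
      unfold pvPassF
      by_cases hc : (!st.1.contains a && pvBoxOk g (bd.getD a (0, 0, 0, 0)) a st.1) = true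
      · rw [if_pos hc]
        exact (PySem.Set.mem_add st.1 a x).mpr (Or.inl hx)
      · rw [if_neg hc]; exact hx
    have hmono : ∀ x ∈ (pvPassF g bd st a).1,
        x ∈ (t.foldl (pvPassF g bd) (pvPassF g bd st a)).1 := by
      intro x hx
      obtain ⟨ext, h1, _⟩ := pvPass_ext g bd t (pvPassF g bd st a)
      rw [h1]
      exact List.mem_append.mpr (Or.inl hx)
    rcases List.mem_cons.mp hd with h | h
    · subst h
      rw [List.foldl_cons]
      apply hmono
      unfold pvPassF
      by_cases hda : d ∈ st.1
      · by_cases hc : (!st.1.contains d && pvBoxOk g (bd.getD d (0, 0, 0, 0)) d st.1) = true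
        · rw [if_pos hc]
          exact (PySem.Set.mem_add st.1 d d).mpr (Or.inl hda)
        · rw [if_neg hc]; exact hda
      · have hnc : st.1.contains d = false := by
          rw [← Bool.not_eq_true]
          intro hcon
          exact hda ((PySem.Set.contains_iff st.1 d).mp hcon)
        have hok : pvBoxOk g (bd.getD d (0, 0, 0, 0)) d st.1 = true := by
          rw [pvBoxOk_iff]
          intro p hp
          rw [← hE] at hp
          exact hsub p (hready p hp)
        rw [if_pos (by rw [hnc, hok]; rfl)]
        exact (PySem.Set.mem_add st.1 d d).mpr (Or.inr rfl)
    · rw [List.foldl_cons]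
      exact ih (pvPassF g bd st a) d h hready (fun x hx => hstep_sub x (hsub x hx))

theorem pvPeel_run (g : List (List Int)) (bd : PySem.Dict Int (Int × Int × Int × Int))
    (C : List Int) (E : Int → Int → Bool) (hE : E = pvE g bd) (hCn : C.Nodup)
    (hEC : ∀ c ∈ C, ∀ x, E c x = true → x ∈ C) :
    ∀ (fuel : Nat) (er : PySem.Set Int), er.Nodup → (∀ x ∈ er, x ∈ C) →
      pvValid C (fun p d => E d p) er →
      C.length + 1 ≤ fuel + er.length →
      ∃ S, S.Nodup ∧ (∀ x ∈ S, x ∈ C) ∧ pvValid C (fun p d => E d p) S ∧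
        pvMax C (fun p d => E d p) S ∧
        pvPeel g bd C fuel er = decide (C.length ≤ S.length) := by
  intro fuel
  induction fuel with
  | zero =>
    intro er h1 h2 _ hfuel
    have : er.length ≤ C.length := (List.subperm_of_subset h1 h2).length_le
    omega
  | succ fuel ih =>
    intro er h1 h2 h3 hfuel
    show ∃ S, _ ∧ _ ∧ _ ∧ _ ∧ (if er.length < C.length then
        (if (C.foldl (pvPassF g bd) (er, false)).2 then
          pvPeel g bd C fuel (C.foldl (pvPassF g bd) (er, false)).1 else false)
        else true) = _
    by_cases hlen : er.length < C.length
    · rw [if_pos hlen]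
      obtain ⟨ext, he1, he2⟩ := pvPass_ext g bd C (er, false)
      obtain ⟨hi1, hi2, hi3⟩ := pvPass_inv g bd C E hE C (fun x hx => hx) (er, false) h1 h2 h3
      by_cases hch : (C.foldl (pvPassF g bd) (er, false)).2 = true
      · rw [if_pos hch]
        have hext : ext ≠ [] := by
          intro h
          rw [h] at he2
          simp [he2] at hch
        have hgrow : er.length + 1 ≤ (C.foldl (pvPassF g bd) (er, false)).1.length := by
          rw [he1]
          have : 1 ≤ ext.length := by
            cases ext with
            | nil => exact absurd rfl hext
            | cons _ _ => simp
          simp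
          omega
        exact ih (C.foldl (pvPassF g bd) (er, false)).1 hi1 hi2 hi3 (by omega)
      · rw [if_neg hch]
        refine ⟨er, h1, h2, h3, ?_, by simp; omega⟩
        have hfix : (C.foldl (pvPassF g bd) (er, false)).1 = er := by
          rw [he1]
          have : ext = [] := by
            rw [he2] at hch
            simpa using hch
          simp [this]
        intro d hd hready
        have hready' : ∀ p, E d p = true → p ∈ er := by
          intro p hp
          exact hready p (hEC d hd p hp) hp
        have := pvPass_ready g bd C E hE er C (er, false) d hd hready' (fun x hx => hx)
        show d ∈ er
        rw [← hfix]
        exact this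
    · rw [if_neg hlen]
      refine ⟨er, h1, h2, h3, ?_, by simp; omega⟩
      have hfull : ∀ x ∈ C, x ∈ er :=
        (pvFull_iff_len hCn h1 h2).mpr (by omega)
      intro d hd _
      exact hfull d hd

-- ===== VERDICT (by name: the statement is the Claim_ definition above) =====
theorem isPrintable_spec : Claim_equal_isPrintable := by
  intro g _ _
  unfold Spec_isPrintable isPrintable isPrintable_alt
  simp only []
  set m : Int := (g.length : Int) with hmdef
  set n : Int := ((PySem.List.pyGetD g 0 []).length : Int) with hndef
  set C : List Int := PySem.Set.ofList (pvCellList g m n) with hCdef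
  set bd := pvBounds g m n with hbddef
  set E : Int → Int → Bool := pvE g bd with hEdef
  rw [pvStep1_fst_char g m n, pvBounds_keys g m n, ← hCdef]
  set G := (pvStep2 g C (pvStep1 g m n).2).1 with hGdef
  set indeg := (pvStep2 g C (pvStep1 g m n).2).2 with hinddef
  have hCn : C.Nodup := PySem.Set.nodup_ofList _
  obtain ⟨hG, hGN, hI⟩ := pvStep2_char g m n C hCdef
  have hEC : ∀ c ∈ C, ∀ x, E c x = true → x ∈ C := by
    intro c hc x hEx
    have hbox : x ∈ pvBoxVals g (bd.getD c (0, 0, 0, 0)) := by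
      rw [hEdef] at hEx
      unfold pvE at hEx
      simp only [Bool.and_eq_true, decide_eq_true_eq] at hEx
      exact hEx.2
    rw [hCdef, PySem.Set.mem_ofList]
    exact pvBoxVals_sub g m n c (by rw [← hCdef]; exact hc) x hbox
  have hGC : ∀ c ∈ C, ∀ x ∈ G.getD c PySem.Set.empty, x ∈ C := by
    intro c hc x hx
    exact hEC c hc x ((hG c hc x).mp hx)
  -- the initial queue is the indegree-zero colours
  rw [PySem.List.foldl_append_ite_eq_filter (fun c => indeg.getD c 0 = 0) C []]
  rw [List.nil_append]
  set Q0 := C.filter (fun c => decide (indeg.getD c 0 = 0)) with hQ0def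
  have hQmem : ∀ x, x ∈ Q0 ↔ (x ∈ C ∧ indeg.getD x 0 = 0) := by
    intro x
    rw [hQ0def, List.mem_filter]
    simp
  have hcnt0 : ∀ d, C.countP (fun c => E c d && decide (c ∉ ([] : List Int)))
      = C.countP (fun c => E c d) := by
    intro d
    apply List.countP_congr
    intro c _
    simp
  obtain ⟨Pf, hPfn, hPfC, hPfV, hPfM, hPfeq⟩ :=
    pvKahn_run C E G hCn hG hGN hGC (C.length + 1) [] Q0 indeg
      (by simp)
      (fun x hx => ((hQmem x).mp hx).1)
      List.nodup_nil
      (List.Nodup.filter _ hCn)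
      (by simp)
      (by
        intro d
        rw [hcnt0 d, hI d])
      (by
        intro d hd
        rw [hcnt0 d]
        have h0 := ((hQmem d).mp hd).2
        rw [hI d] at h0
        exact_mod_cast h0)
      (by simp)
      (by
        intro d hd _ hdQ
        rw [hcnt0 d]
        intro hcon
        apply hdQ
        rw [hQmem d]
        refine ⟨hd, ?_⟩
        rw [hI d, hcon]
        rfl)
      (pvValid_nil C E)
      (by simp)
  obtain ⟨S, hSn, hSC, hSV, hSM, hSeq⟩ :=
    pvPeel_run g bd C E hEdef hCn hEC (C.length + 1) PySem.Set.empty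
      List.nodup_nil
      (by intro x hx; simp [PySem.Set.empty] at hx)
      (pvValid_nil C (fun p d => E d p))
      (by simp [PySem.Set.empty])
  rw [hSeq]
  have hPfeq' : pvKahn G (C.length + 1) Q0 0 indeg = (Pf.length : Int) := by
    simpa using hPfeq
  rw [hPfeq']
  -- both sides decide "is the run full"
  have hfullPf : (∀ x ∈ C, x ∈ Pf) ↔ (∀ x ∈ C, x ∈ S) := by
    constructor
    · intro h
      exact pvFull_flip hPfn hPfC hPfV h hSM
    · intro h
      exact pvFull_flip hSn hSC hSV h (E := fun p d => E d p) hPfM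
  have h1 : ((Pf.length : Int) = (C.length : Int)) ↔ C.length ≤ S.length := by
    have hle : Pf.length ≤ C.length := (List.subperm_of_subset hPfn hPfC).length_le
    constructor
    · intro h
      apply (pvFull_iff_len hCn hSn hSC).mp
      apply hfullPf.mp
      apply (pvFull_iff_len hCn hPfn hPfC).mpr
      omega
    · intro h
      have := (pvFull_iff_len hCn hPfn hPfC).mp
        (hfullPf.mpr ((pvFull_iff_len hCn hSn hSC).mpr h))
      omega
  simp only [decide_eq_decide]
  exact h1
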